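-- pv_equiv track=rewrite | github.com/boonepeter/franklin-api | app/rosalind/revp.py | get_palindrom_locations
-- ===== SOURCE A (Python) =====
-- from typing import List, Tuple
--
-- REV = {
--     "A": "T",
--     "T": "A",
--     "G": "C",
--     "C": "G"
-- }
--
-- def is_palindrom(seq: str) -> bool:
--     for i in range(len(seq)):
--         a = seq[i]
--         b = seq[-(i + 1)]
--         if not a == REV[b]:
--             return False
--     return True
--
-- def get_palindrom_locations(sequence: str, min_len: int=4, max_len: int=12) -> List[Tuple[int, int]]:
--     pals = []
--     for i in range(len(sequence)):
--         for j in range(min_len, max_len + 1):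
--             if i + j > len(sequence):
--                 continue
--             s = sequence[i: i + j]
--             if is_palindrom(s):
--                 pals.append((i + 1, len(s)))
--     return pals
-- ===== SOURCE B (Python) =====
-- COMP = {"A": "T", "C": "G", "G": "C", "T": "A"}
--
-- def get_palindrom_locations(sequence, min_len=4, max_len=12):
--     # Reverse-complement palindromes are necessarily of even length, and all
--     # palindromic substrings share one of the n-1 "gap" centers: expand each
--     # center once (never beyond max_len//2), emit every admissible length,
--     # then sort by (start, length).
--     n = len(sequence)
--     cap = max_len // 2
--     lo = min_len if min_len > 2 else 2
--     if lo % 2 == 1: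
--         lo += 1
--     if max_len < lo:  # empty length window: nothing can qualify
--         return []
--     res = []
--     for c in range(1, n):
--         r = 0
--         while r < cap and r < c and c + r < n and COMP.get(sequence[c + r]) == sequence[c - 1 - r]:
--             r += 1
--         for length in range(lo, 2 * r + 1, 2):
--             res.append((c - length // 2 + 1, length))
--     res.sort()
--     return res
-- ===== Notes on version B (the rewrite author's own statement) =====
-- stated objective: faster
-- what changed: B replaces A's per-start re-scan of every candidate substring (each sliced out and checked character-by-character from scratch) by a single expand-around-center pass: each of the n-1 gap centers is expanded once to its maximal reverse-complement radius (capped at max_len//2), every admissible even length is emitted from that radius, and the results are sorted by (start, length).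
-- intended difference: On inputs with min_len <= 0 (and min_len <= max_len and a nonempty sequence) A appends a zero-length pseudo-palindrome (i+1, 0) at every position for every non-positive candidate length, an artefact of Python's empty slice being vacuously palindromic; B reports only genuine palindromes of length >= 2, which is the intended behaviour. — e.g. on get_palindrom_locations("A", 0, 0): A returns [(1, 0)], B returns []
-- outside the precondition, e.g. on get_palindrom_locations('XA', 2, 2): A returns [], B returns []; on get_palindrom_locations('0', 0, 0): A returns [(1, 0)], B returns []
import Mathlib
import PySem

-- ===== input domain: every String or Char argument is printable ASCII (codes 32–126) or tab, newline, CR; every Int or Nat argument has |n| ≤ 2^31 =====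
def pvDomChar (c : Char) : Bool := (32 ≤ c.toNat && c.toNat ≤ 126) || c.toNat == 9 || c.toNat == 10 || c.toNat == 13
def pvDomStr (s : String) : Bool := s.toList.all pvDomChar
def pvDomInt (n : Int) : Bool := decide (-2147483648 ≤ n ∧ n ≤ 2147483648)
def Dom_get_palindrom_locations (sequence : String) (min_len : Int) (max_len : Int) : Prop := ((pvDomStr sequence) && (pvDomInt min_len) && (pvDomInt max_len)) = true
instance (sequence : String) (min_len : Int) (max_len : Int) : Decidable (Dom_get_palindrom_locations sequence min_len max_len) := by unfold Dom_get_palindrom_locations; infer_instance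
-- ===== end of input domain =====

-- B is an expand-around-center rewrite of A (each gap center expanded once, results
-- sorted by (start, length)); asymptotically faster than A's per-substring rescans.
-- On min_len ≤ 0 A emits zero-length empty-slice "palindromes"; B intentionally does
-- not (see D_ below).  A's KeyError inputs (characters outside ACGT) are excluded by Pre_.

-- ===== PORT A =====
def pvRevA : PySem.Dict Char Char :=
  PySem.Dict.ofList [('A', 'T'), ('T', 'A'), ('G', 'C'), ('C', 'G')]

-- loop 'for i in range(len(seq)) … return False … return True' is List.all over the range;
-- indexes are always in range, and REV[b]'s KeyError is excluded by Pre_ (ACGT only).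
def is_palindrom (seq : List Char) : Bool :=
  (PySem.List.pyRange 0 (seq.length : Int) 1).all (fun i =>
    let a := PySem.List.pyGetD seq i ' '
    let b := PySem.List.pyGetD seq (-(i + 1)) ' '
    a == PySem.Dict.getD pvRevA b ' ')

def get_palindrom_locations (sequence : String) (min_len : Int) (max_len : Int) : List (Int × Int) :=
  let seq := sequence.toList
  let n : Int := seq.length
  (PySem.List.pyRange 0 n 1).foldl (fun pals i =>
    (PySem.List.pyRange min_len (max_len + 1) 1).foldl (fun pals j =>
      if i + j > n then pals
      else
        let s := PySem.List.slice seq (some i) (some (i + j))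
        if is_palindrom s then pals ++ [(i + 1, (s.length : Int))] else pals) pals) []

-- ===== PORT B =====
def pvCompB : PySem.Dict Char Char :=
  PySem.Dict.ofList [('A', 'T'), ('C', 'G'), ('G', 'C'), ('T', 'A')]

-- the 'while r < cap and r < c and c + r < n and COMP.get(...) == ...' loop of Source B,
-- with fuel (the guard r < c ≤ n bounds the iteration count by seq.length)
def pvExpand (seq : List Char) (cap : Int) (n : Int) (c : Int) (r : Int) : Nat → Int
  | 0 => r
  | fuel + 1 =>
    if r < cap && r < c && c + r < n &&
        (PySem.Dict.get? pvCompB (PySem.List.pyGetD seq (c + r) ' ')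
          == some (PySem.List.pyGetD seq (c - 1 - r) ' '))
    then pvExpand seq cap n c (r + 1) fuel
    else r

def get_palindrom_locations_alt (sequence : String) (min_len : Int) (max_len : Int) : List (Int × Int) :=
  let seq := sequence.toList
  let n : Int := seq.length
  let cap := PySem.Int.floordiv max_len 2
  let lo0 := if min_len > 2 then min_len else 2
  let lo := if PySem.Int.mod lo0 2 == 1 then lo0 + 1 else lo0
  if max_len < lo then []  -- empty length window: nothing can qualify
  else
    let res := (PySem.List.pyRange 1 n 1).foldl (fun res c =>
      let r := pvExpand seq cap n c 0 seq.length
      (PySem.List.pyRange lo (2 * r + 1) 2).foldl (fun res L =>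
        res ++ [(c - PySem.Int.floordiv L 2 + 1, L)]) res) []
    PySem.List.sorted2 res Prod.fst Prod.snd

-- ===== PRECONDITION & SPEC =====
-- Pre_ excludes sequences containing characters outside {A,C,G,T} (unless the length
-- window is empty or longer than the string, so that A checks no substring at all): on
-- most of those A raises KeyError in is_palindrom, and whether it raises depends on the
-- incidental position of the foreign character (e.g. on "XA" A happens to return []).
def Pre_get_palindrom_locations (sequence : String) (min_len : Int) (max_len : Int) : Prop :=
  sequence.toList.all (fun ch => decide (ch ∈ (['A', 'C', 'G', 'T'] : List Char))) = true
    ∨ max_len < min_len ∨ (sequence.toList.length : Int) < min_len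
instance (sequence : String) (min_len : Int) (max_len : Int) : Decidable (Pre_get_palindrom_locations sequence min_len max_len) := by unfold Pre_get_palindrom_locations; infer_instance

def pvWitness_get_palindrom_locations : String × Int × Int := ("GAATTC", 4, 12)

-- On min_len ≤ 0 (with min_len ≤ max_len and a nonempty sequence) A appends a zero-length
-- pseudo-palindrome (i+1, 0) at every position for every non-positive candidate length —
-- an artefact of Python's empty slice being vacuously palindromic; B reports only genuine
-- palindromes of length ≥ 2, which is the intended behaviour.
def D_get_palindrom_locations (sequence : String) (min_len : Int) (max_len : Int) : Prop :=
  min_len ≤ 0 ∧ min_len ≤ max_len ∧ sequence ≠ ""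
instance (sequence : String) (min_len : Int) (max_len : Int) : Decidable (D_get_palindrom_locations sequence min_len max_len) := by unfold D_get_palindrom_locations; infer_instance

def Spec_get_palindrom_locations (sequence : String) (min_len : Int) (max_len : Int) (out : List (Int × Int)) : Prop := ¬ D_get_palindrom_locations sequence min_len max_len → out = get_palindrom_locations_alt sequence min_len max_len
instance (sequence : String) (min_len : Int) (max_len : Int) (out : List (Int × Int)) : Decidable (Spec_get_palindrom_locations sequence min_len max_len out) := by unfold Spec_get_palindrom_locations; infer_instance

def pvDiffWitness_get_palindrom_locations : String × Int × Int := ("A", 0, 0)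
def pvDiffWitnessOut_get_palindrom_locations : (List (Int × Int)) × (List (Int × Int)) := ([(1, 0)], [])

-- ===== CLAIM (what is proved, stated in full; the proofs are below) =====
def Claim_unchanged_get_palindrom_locations : Prop := ∀ (sequence : String) (min_len : Int) (max_len : Int), Dom_get_palindrom_locations sequence min_len max_len → Pre_get_palindrom_locations sequence min_len max_len → Spec_get_palindrom_locations sequence min_len max_len (get_palindrom_locations sequence min_len max_len)
def Claim_changed_get_palindrom_locations : Prop := Dom_get_palindrom_locations (pvDiffWitness_get_palindrom_locations.1) (pvDiffWitness_get_palindrom_locations.2.1) (pvDiffWitness_get_palindrom_locations.2.2) ∧ Pre_get_palindrom_locations (pvDiffWitness_get_palindrom_locations.1) (pvDiffWitness_get_palindrom_locations.2.1) (pvDiffWitness_get_palindrom_locations.2.2) ∧ D_get_palindrom_locations (pvDiffWitness_get_palindrom_locations.1) (pvDiffWitness_get_palindrom_locations.2.1) (pvDiffWitness_get_palindrom_locations.2.2) ∧ get_palindrom_locations (pvDiffWitness_get_palindrom_locations.1) (pvDiffWitness_get_palindrom_locations.2.1) (pvDiffWitness_get_palindrom_locations.2.2) = pvDiffWitnessOut_get_palindrom_locations.1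 ∧ get_palindrom_locations_alt (pvDiffWitness_get_palindrom_locations.1) (pvDiffWitness_get_palindrom_locations.2.1) (pvDiffWitness_get_palindrom_locations.2.2) = pvDiffWitnessOut_get_palindrom_locations.2 ∧ pvDiffWitnessOut_get_palindrom_locations.1 ≠ pvDiffWitnessOut_get_palindrom_locations.2
def Claim_exact_get_palindrom_locations : Prop := ∀ (sequence : String) (min_len : Int) (max_len : Int), Dom_get_palindrom_locations sequence min_len max_len → Pre_get_palindrom_locations sequence min_len max_len → D_get_palindrom_locations sequence min_len max_len → get_palindrom_locations sequence min_len max_len ≠ get_palindrom_locations_alt sequence min_len max_len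

-- ===== LEMMAS AND PROOFS =====

-- ---- characters and complement ----
def pvACGT : List Char := ['A', 'C', 'G', 'T']

def pvComp (c : Char) : Char :=
  if c = 'A' then 'T' else if c = 'C' then 'G' else if c = 'G' then 'C' else if c = 'T' then 'A' else c

def pvMB (seq : List Char) (x y : Nat) : Prop := pvComp (seq.getD x ' ') = seq.getD y ' '

lemma pvMem_cases {x : Char} (h : x ∈ pvACGT) : x = 'A' ∨ x = 'C' ∨ x = 'G' ∨ x = 'T' := by
  simpa [pvACGT] using h

lemma pvRevA_getD {x : Char} (h : x ∈ pvACGT) : PySem.Dict.getD pvRevA x ' ' = pvComp x := by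
  rcases pvMem_cases h with rfl | rfl | rfl | rfl <;> decide

lemma pvCompB_get? {x : Char} (h : x ∈ pvACGT) : PySem.Dict.get? pvCompB x = some (pvComp x) := by
  rcases pvMem_cases h with rfl | rfl | rfl | rfl <;> decide

lemma pvComp_invol {x : Char} (h : x ∈ pvACGT) : pvComp (pvComp x) = x := by
  rcases pvMem_cases h with rfl | rfl | rfl | rfl <;> decide

lemma pvComp_ne {x : Char} (h : x ∈ pvACGT) : pvComp x ≠ x := by
  rcases pvMem_cases h with rfl | rfl | rfl | rfl <;> decide

lemma pvPre_chars {sequence : String}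
    (h : sequence.toList.all (fun ch => decide (ch ∈ (['A', 'C', 'G', 'T'] : List Char))) = true) :
    ∀ ch ∈ sequence.toList, ch ∈ pvACGT := by
  intro ch hch
  have := List.all_eq_true.mp h ch hch
  simpa [pvACGT] using this

lemma pvChar_mem {seq : List Char} (hPre : ∀ ch ∈ seq, ch ∈ pvACGT) {p : Nat}
    (hp : p < seq.length) : seq.getD p ' ' ∈ pvACGT := by
  rw [List.getD_eq_getElem seq ' ' hp]
  exact hPre _ (seq.getElem_mem hp)

-- ---- loop normal forms ----
lemma pvFoldl_inner {α : Type} (l : List Int) (P : Int → Prop) [DecidablePred P]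
    (Q : Int → Bool) (f : Int → α) (acc : List α) :
    l.foldl (fun pals j => if P j then pals else if Q j then pals ++ [f j] else pals) acc
      = acc ++ (l.filter (fun j => !(decide (P j)) && Q j)).map f := by
  induction l generalizing acc with
  | nil => simp
  | cons x xs ih =>
    simp only [List.foldl_cons, List.filter_cons]
    by_cases hP : P x
    · simp [hP, ih]
    · by_cases hQ : Q x
      · simp [hP, hQ, ih]
      · simp [hP, hQ, ih]

def pvABlock (seq : List Char) (min_len max_len : Int) (i : Int) : List (Int × Int) :=
  ((PySem.List.pyRange min_len (max_len + 1) 1).filter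
      (fun j => !(decide (i + j > (seq.length : Int)))
        && is_palindrom (PySem.List.slice seq (some i) (some (i + j))))).map
    (fun j => (i + 1, ((PySem.List.slice seq (some i) (some (i + j))).length : Int)))

def pvAList (seq : List Char) (min_len max_len : Int) : List (Int × Int) :=
  (PySem.List.pyRange 0 (seq.length : Int) 1).flatMap (pvABlock seq min_len max_len)

lemma pvA_eq (sequence : String) (min_len max_len : Int) :
    get_palindrom_locations sequence min_len max_len
      = pvAList sequence.toList min_len max_len := by
  simp only [get_palindrom_locations]
  unfold pvAList
  rw [PySem.List.foldl_congr_mem _ _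
    (fun pals i => pals ++ pvABlock sequence.toList min_len max_len i) _
    (fun acc i _ => pvFoldl_inner _ _ _ _ acc)]
  simpa using PySem.List.foldl_append_eq_flatMap (pvABlock sequence.toList min_len max_len) _ []

def pvRho (seq : List Char) (cap : Int) (c : Int) : Int :=
  pvExpand seq cap (seq.length : Int) c 0 seq.length

def pvLo (min_len : Int) : Int :=
  if PySem.Int.mod (if min_len > 2 then min_len else 2) 2 == 1
  then (if min_len > 2 then min_len else 2) + 1 else (if min_len > 2 then min_len else 2)

def pvBBlock (seq : List Char) (min_len max_len : Int) (c : Int) : List (Int × Int) :=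
  (PySem.List.pyRange (pvLo min_len) (2 * pvRho seq (PySem.Int.floordiv max_len 2) c + 1) 2).map
    (fun L => (c - PySem.Int.floordiv L 2 + 1, L))

def pvBFlat (seq : List Char) (min_len max_len : Int) : List (Int × Int) :=
  (PySem.List.pyRange 1 (seq.length : Int) 1).flatMap (pvBBlock seq min_len max_len)

lemma pvB_eq_nil (sequence : String) (min_len max_len : Int) (h : max_len < pvLo min_len) :
    get_palindrom_locations_alt sequence min_len max_len = [] := by
  simp only [get_palindrom_locations_alt]
  rw [if_pos (by unfold pvLo at h; exact h)]

lemma pvB_eq (sequence : String) (min_len max_len : Int) (h : ¬ max_len < pvLo min_len) :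
    get_palindrom_locations_alt sequence min_len max_len
      = PySem.List.sorted2 (pvBFlat sequence.toList min_len max_len) Prod.fst Prod.snd := by
  simp only [get_palindrom_locations_alt]
  rw [if_neg (by unfold pvLo at h; exact h)]
  unfold pvBFlat
  congr 1
  rw [PySem.List.foldl_congr_mem _ _
    (fun res c => res ++ pvBBlock sequence.toList min_len max_len c) _
    (fun acc c _ => by
      simpa [pvBBlock, pvLo, pvRho] using
        PySem.List.foldl_append_singleton_eq_map
          (fun L => (c - PySem.Int.floordiv L 2 + 1, L))
          (PySem.List.pyRange (pvLo min_len)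
            (2 * pvRho sequence.toList (PySem.Int.floordiv max_len 2) c + 1) 2) acc)]
  simpa using PySem.List.foldl_append_eq_flatMap (pvBBlock sequence.toList min_len max_len) _ []

-- ---- A's palindrome test, characterized over the underlying sequence ----
lemma pvPal_iff (seq : List Char) (hPre : ∀ ch ∈ seq, ch ∈ pvACGT) (iN jN : Nat)
    (hij : iN + jN ≤ seq.length) (hj : 1 ≤ jN) :
    (is_palindrom (PySem.List.slice seq (some (iN : Int)) (some ((iN : Int) + (jN : Int)))) = true)
      ↔ ∃ kN : Nat, jN = 2 * kN ∧ 1 ≤ kN ∧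
          ∀ m < kN, pvMB seq (iN + kN + m) (iN + kN - 1 - m) := by
  rw [PySem.List.slice_natCast_add]
  set s := List.take jN (List.drop iN seq) with hs
  have hlen : s.length = jN := by simp [hs]; omega
  have hget : ∀ p, p < jN → s.getD p ' ' = seq.getD (iN + p) ' ' := by
    intro p hp
    have h1 : p < s.length := by omega
    rw [List.getD_eq_getElem _ _ h1, List.getD_eq_getElem _ _ (by omega : iN + p < seq.length)]
    simp [hs, List.getElem_take, List.getElem_drop]
  have hEiff : (is_palindrom s = true) ↔
      (∀ p, p < jN → seq.getD (iN + p) ' ' = pvComp (seq.getD (iN + (jN - 1 - p)) ' ')) := by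
    simp only [is_palindrom, List.all_eq_true]
    constructor
    · intro h p hp
      have hx := h (p : Int) (by rw [PySem.List.mem_pyRange_one]; exact ⟨Int.natCast_nonneg p, by exact_mod_cast (by omega : p < s.length)⟩)
      revert hx
      rw [show ((-(((p:Int)) + 1)) : Int) = -((p + 1 : Nat) : Int) from by push_cast; ring]
      rw [PySem.List.pyGetD_natCast, PySem.List.pyGetD, PySem.List.pyGet?_neg_natCast s (p+1) (by omega) (by omega)]
      rw [show s.length - (p+1) = jN - 1 - p from by omega]
      rw [← List.getD_eq_getElem?_getD]
      rw [hget p hp, hget (jN - 1 - p) (by omega)]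
      intro hx
      rw [pvRevA_getD (pvChar_mem hPre (by omega))] at hx
      exact beq_iff_eq.mp hx
    · intro h x hx
      rw [PySem.List.mem_pyRange_one] at hx
      obtain ⟨hx0, hx1⟩ := hx
      obtain ⟨p, rfl⟩ := Int.eq_ofNat_of_zero_le hx0
      have hp : p < jN := by
        have h2 : p < s.length := by exact_mod_cast hx1
        omega
      rw [show ((-(((p:Int)) + 1)) : Int) = -((p + 1 : Nat) : Int) from by push_cast; ring]
      rw [PySem.List.pyGetD_natCast, PySem.List.pyGetD, PySem.List.pyGet?_neg_natCast s (p+1) (by omega) (by omega)]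
      rw [show s.length - (p+1) = jN - 1 - p from by omega]
      rw [← List.getD_eq_getElem?_getD]
      rw [hget p hp, hget (jN - 1 - p) (by omega)]
      rw [pvRevA_getD (pvChar_mem hPre (by omega))]
      exact beq_iff_eq.mpr (h p hp)
  rw [hEiff]
  constructor
  · intro hE
    have hev : jN % 2 = 0 := by
      by_contra hodd
      have ht := hE (jN / 2) (by omega)
      rw [show jN - 1 - jN / 2 = jN / 2 from by omega] at ht
      exact pvComp_ne (pvChar_mem hPre (by omega)) ht.symm
    refine ⟨jN / 2, by omega, by omega, ?_⟩
    intro m hm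
    have hp := hE (jN / 2 + m) (by omega)
    rw [show jN - 1 - (jN / 2 + m) = jN / 2 - 1 - m from by omega] at hp
    have hc := congrArg pvComp hp
    rw [pvComp_invol (pvChar_mem hPre (by omega))] at hc
    unfold pvMB
    rw [show iN + jN / 2 + m = iN + (jN / 2 + m) from by omega,
        show iN + jN / 2 - 1 - m = iN + (jN / 2 - 1 - m) from by omega]
    exact hc
  · rintro ⟨k, rfl, hk1, hM⟩
    intro p hp
    by_cases hpk : p < k
    · have hm := hM (k - 1 - p) (by omega)
      unfold pvMB at hm
      rw [show iN + k + (k - 1 - p) = iN + (2 * k - 1 - p) from by omega,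
          show iN + k - 1 - (k - 1 - p) = iN + p from by omega] at hm
      exact hm.symm
    · have hm := hM (p - k) (by omega)
      unfold pvMB at hm
      rw [show iN + k + (p - k) = iN + p from by omega,
          show iN + k - 1 - (p - k) = iN + (2 * k - 1 - p) from by omega] at hm
      have hc := congrArg pvComp hm
      rw [pvComp_invol (pvChar_mem hPre (by omega))] at hc
      exact hc

-- ---- B's expansion loop, characterized ----
def pvCondB (seq : List Char) (cap n c r : Int) : Bool :=
  r < cap && r < c && c + r < n &&
    (PySem.Dict.get? pvCompB (PySem.List.pyGetD seq (c + r) ' ')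
      == some (PySem.List.pyGetD seq (c - 1 - r) ' '))

lemma pvExpand_succ (seq : List Char) (cap n c r : Int) (fuel : Nat) :
    pvExpand seq cap n c r (fuel + 1)
      = if pvCondB seq cap n c r then pvExpand seq cap n c (r + 1) fuel else r := rfl

lemma pvCondB_bounds {seq : List Char} {cap n c r : Int} (h : pvCondB seq cap n c r = true) :
    r < cap ∧ r < c ∧ c + r < n := by
  unfold pvCondB at h
  simp only [Bool.and_eq_true, decide_eq_true_eq] at h
  exact ⟨h.1.1.1, h.1.1.2, h.1.2⟩

lemma pvExpand_spec (seq : List Char) (cap n c : Int) :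
    ∀ (fuel : Nat) (r : Int), 0 ≤ r → (c - r).toNat < fuel →
      r ≤ pvExpand seq cap n c r fuel
      ∧ (∀ m, r ≤ m → m < pvExpand seq cap n c r fuel → pvCondB seq cap n c m = true)
      ∧ pvCondB seq cap n c (pvExpand seq cap n c r fuel) = false := by
  intro fuel
  induction fuel with
  | zero => intro r h0 hf; omega
  | succ f ih =>
    intro r h0 hf
    rw [pvExpand_succ]
    by_cases hcond : pvCondB seq cap n c r = true
    · rw [if_pos hcond]
      have hrc : r < c := (pvCondB_bounds hcond).2.1
      have hrec := ih (r + 1) (by omega) (by omega)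
      refine ⟨by omega, ?_, hrec.2.2⟩
      intro m h1 h2
      rcases eq_or_lt_of_le h1 with rfl | h1'
      · exact hcond
      · exact hrec.2.1 m (by omega) h2
    · rw [if_neg hcond]
      exact ⟨le_refl r, fun m h1 h2 => by omega, by simpa using hcond⟩

lemma pvCondB_iff (seq : List Char) (hPre : ∀ ch ∈ seq, ch ∈ pvACGT) (cap : Int) (c m : Nat) :
    (pvCondB seq cap (seq.length : Int) (c : Int) (m : Int) = true)
      ↔ ((m : Int) < cap ∧ m < c ∧ c + m < seq.length ∧ pvMB seq (c + m) (c - 1 - m)) := by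
  unfold pvCondB
  simp only [Bool.and_eq_true, decide_eq_true_eq, beq_iff_eq]
  constructor
  · rintro ⟨⟨⟨h0, h1⟩, h2⟩, h3⟩
    have hm : m < c := by exact_mod_cast h1
    have hn : c + m < seq.length := by exact_mod_cast h2
    refine ⟨h0, hm, hn, ?_⟩
    rw [show ((c : Int) + m) = ((c + m : Nat) : Int) from by omega, PySem.List.pyGetD_natCast,
        show ((c : Int) - 1 - m) = ((c - 1 - m : Nat) : Int) from by omega,
        PySem.List.pyGetD_natCast, pvCompB_get? (pvChar_mem hPre (by omega))] at h3
    exact Option.some_inj.mp h3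
  · rintro ⟨h0, hm, hn, h3⟩
    refine ⟨⟨⟨h0, by exact_mod_cast hm⟩, by exact_mod_cast hn⟩, ?_⟩
    rw [show ((c : Int) + m) = ((c + m : Nat) : Int) from by omega, PySem.List.pyGetD_natCast,
        show ((c : Int) - 1 - m) = ((c - 1 - m : Nat) : Int) from by omega,
        PySem.List.pyGetD_natCast, pvCompB_get? (pvChar_mem hPre (by omega))]
    exact Option.some_inj.mpr h3

lemma pvRho_spec (seq : List Char) (cap c : Int) (hc1 : 1 ≤ c) (hcn : c < (seq.length : Int)) :
    0 ≤ pvRho seq cap c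
    ∧ (∀ m, 0 ≤ m → m < pvRho seq cap c → pvCondB seq cap (seq.length : Int) c m = true)
    ∧ pvCondB seq cap (seq.length : Int) c (pvRho seq cap c) = false := by
  have h := pvExpand_spec seq cap (seq.length : Int) c seq.length 0 (by omega) (by omega)
  exact ⟨h.1, h.2.1, h.2.2⟩

lemma pvRho_le_iff (seq : List Char) (hPre : ∀ ch ∈ seq, ch ∈ pvACGT) (cap : Int) (c k : Nat)
    (hc1 : 1 ≤ c) (hcn : c < seq.length) :
    ((k : Int) ≤ pvRho seq cap c)
      ↔ ∀ m, m < k → ((m : Int) < cap ∧ m < c ∧ c + m < seq.length ∧ pvMB seq (c + m) (c - 1 - m)) := by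
  have hs := pvRho_spec seq cap (c : Int) (by exact_mod_cast hc1) (by exact_mod_cast hcn)
  constructor
  · intro hk m hm
    have := hs.2.1 (m : Int) (by omega) (by omega)
    exact (pvCondB_iff seq hPre cap c m).mp this
  · intro hM
    by_contra hlt
    push Not at hlt
    obtain ⟨ρ, hρ⟩ := Int.eq_ofNat_of_zero_le hs.1
    have hρk : ρ < k := by omega
    have := (pvCondB_iff seq hPre cap c ρ).mpr (hM ρ hρk)
    rw [← hρ] at this
    rw [hs.2.2] at this
    exact Bool.false_ne_true this

-- ---- the bounds lo and hi of Source B ----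
lemma pvLo_facts (mn : Int) :
    2 ∣ pvLo mn ∧ 2 ≤ pvLo mn ∧ mn ≤ pvLo mn ∧ (pvLo mn ≤ 2 ∨ pvLo mn ≤ mn + 1) := by
  unfold pvLo
  have e : PySem.Int.mod (if mn > 2 then mn else 2) 2 = (if mn > 2 then mn else 2) % 2 :=
    PySem.Int.mod_eq_emod_of_pos (by norm_num)
  simp only [e, beq_iff_eq]
  split_ifs <;> omega

-- ---- the common description of both hit lists ----
def pvSpecSet (seq : List Char) (mn mx : Int) (x : Int × Int) : Prop :=
  ∃ c k : Nat, 1 ≤ k ∧ k ≤ c ∧ c + k ≤ seq.length ∧ mn ≤ (2 * k : Int) ∧ (2 * k : Int) ≤ mx ∧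
    (∀ m, m < k → pvMB seq (c + m) (c - 1 - m)) ∧ x = ((c : Int) - k + 1, (2 * k : Int))

lemma pvSliceLen (seq : List Char) (i j : Int) (h0 : 0 ≤ i) (hj : 0 ≤ j)
    (hij : i + j ≤ (seq.length : Int)) :
    ((PySem.List.slice seq (some i) (some (i + j))).length : Int) = j := by
  rw [PySem.List.length_slice]
  simp only [PySem.List.clampIdx]
  split_ifs <;> omega

lemma pvA_mem (seq : List Char) (mn mx : Int) (hPre : ∀ ch ∈ seq, ch ∈ pvACGT)
    (hmn : 1 ≤ mn) (x : Int × Int) :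
    x ∈ pvAList seq mn mx ↔ pvSpecSet seq mn mx x := by
  unfold pvAList pvABlock pvSpecSet
  rw [List.mem_flatMap]
  constructor
  · rintro ⟨i, hi, hx⟩
    rw [PySem.List.mem_pyRange_one] at hi
    obtain ⟨iN, rfl⟩ := Int.eq_ofNat_of_zero_le hi.1
    have hiN : iN < seq.length := by exact_mod_cast hi.2
    rw [List.mem_map] at hx
    obtain ⟨j, hj, hxe⟩ := hx
    rw [List.mem_filter] at hj
    obtain ⟨hjr, hjc⟩ := hj
    rw [PySem.List.mem_pyRange_one] at hjr
    have hj1 : 1 ≤ j := le_trans hmn hjr.1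
    obtain ⟨jN, rfl⟩ := Int.eq_ofNat_of_zero_le (by omega : (0:Int) ≤ j)
    simp only [Bool.and_eq_true, Bool.not_eq_true', decide_eq_false_iff_not, not_lt] at hjc
    have hij : iN + jN ≤ seq.length := by exact_mod_cast hjc.1
    have hpal := (pvPal_iff seq hPre iN jN hij (by exact_mod_cast hj1)).mp hjc.2
    obtain ⟨k, rfl, hk1, hM⟩ := hpal
    refine ⟨iN + k, k, hk1, by omega, by omega, by exact_mod_cast hjr.1,
      by have := hjr.2; omega, fun m hm => ?_, ?_⟩
    · have := hM m hm
      rwa [show iN + k + m = iN + k + m from rfl] at this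
    · rw [← hxe, pvSliceLen seq _ _ (by omega) (by omega) (by omega)]
      simp only [Prod.mk.injEq]
      constructor <;> (push_cast; try omega)
  · rintro ⟨c, k, hk1, hkc, hck, hmn2, hmx2, hM, rfl⟩
    refine ⟨((c - k : Nat) : Int), ?_, ?_⟩
    · rw [PySem.List.mem_pyRange_one]
      constructor
      · positivity
      · exact_mod_cast (by omega : c - k < seq.length)
    · rw [List.mem_map]
      refine ⟨((2 * k : Nat) : Int), ?_, ?_⟩
      · rw [List.mem_filter, PySem.List.mem_pyRange_one]
        refine ⟨⟨by exact_mod_cast hmn2, by exact_mod_cast (by omega : (2 * k : Int) < mx + 1)⟩, ?_⟩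
        simp only [Bool.and_eq_true, Bool.not_eq_true', decide_eq_false_iff_not, not_lt]
        refine ⟨by exact_mod_cast (by omega : ((c - k + 2 * k : Nat) : Int) ≤ (seq.length : Int)), ?_⟩
        rw [pvPal_iff seq hPre (c - k) (2 * k) (by omega) (by omega)]
        refine ⟨k, rfl, hk1, fun m hm => ?_⟩
        have := hM m hm
        rwa [show c - k + k + m = c + m from by omega,
             show c - k + k - 1 - m = c - 1 - m from by omega]
      · rw [pvSliceLen seq _ _ (by omega) (by omega) (by omega)]
        simp only [Prod.mk.injEq]
        constructor <;> (push_cast; try omega)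

lemma pvB_mem (seq : List Char) (mn mx : Int) (hPre : ∀ ch ∈ seq, ch ∈ pvACGT)
    (x : Int × Int) :
    x ∈ pvBFlat seq mn mx ↔ pvSpecSet seq mn mx x := by
  unfold pvBFlat pvBBlock pvSpecSet
  rw [List.mem_flatMap]
  constructor
  · rintro ⟨cI, hc, hx⟩
    rw [PySem.List.mem_pyRange_one] at hc
    obtain ⟨cN, rfl⟩ := Int.eq_ofNat_of_zero_le (by omega : (0:Int) ≤ cI)
    have hc1 : 1 ≤ cN := by exact_mod_cast hc.1
    have hcn : cN < seq.length := by exact_mod_cast hc.2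
    rw [List.mem_map] at hx
    obtain ⟨L, hL, hxe⟩ := hx
    rw [PySem.List.mem_pyRange_iff_of_pos (by norm_num)] at hL
    obtain ⟨hL1, hL2, hLd⟩ := hL
    have hlo := pvLo_facts mn
    have h2L : 2 ∣ L := by omega
    have hL2' : 2 ≤ L := by omega
    obtain ⟨kk, rfl⟩ : ∃ kN : Nat, L = (2 * kN : Int) := ⟨L.toNat / 2, by omega⟩
    have hkrho : (kk : Int) ≤ pvRho seq (PySem.Int.floordiv mx 2) cN := by omega
    have hMfull := (pvRho_le_iff seq hPre (PySem.Int.floordiv mx 2) cN kk hc1 hcn).mp hkrho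
    have hkk1 : 1 ≤ kk := by omega
    have hcap := (hMfull (kk - 1) (by omega)).1
    have hmxx : (2 * (kk : Int)) ≤ mx := by
      rw [PySem.Int.floordiv_eq_ediv_of_pos (by norm_num)] at hcap
      omega
    refine ⟨cN, kk, hkk1, by have := (hMfull (kk - 1) (by omega)).2.1; omega,
      by have := (hMfull (kk - 1) (by omega)).2.2.1; omega, by omega, hmxx,
      fun m hm => (hMfull m hm).2.2.2, ?_⟩
    · rw [← hxe]
      rw [PySem.Int.floordiv_eq_ediv_of_pos (by norm_num)]
      simp only [Prod.mk.injEq]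
      constructor <;> (push_cast; try omega)
  · rintro ⟨c, k, hk1, hkc, hck, hmn2, hmx2, hM, rfl⟩
    have hc1 : 1 ≤ c := by omega
    have hcn : c < seq.length := by omega
    refine ⟨(c : Int), ?_, ?_⟩
    · rw [PySem.List.mem_pyRange_one]
      exact ⟨by exact_mod_cast hc1, by exact_mod_cast hcn⟩
    · rw [List.mem_map]
      refine ⟨(2 * k : Int), ?_, ?_⟩
      · rw [PySem.List.mem_pyRange_iff_of_pos (by norm_num)]
        have hlo := pvLo_facts mn
        have hrho : ((k : Int)) ≤ pvRho seq (PySem.Int.floordiv mx 2) c := by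
          rw [pvRho_le_iff seq hPre (PySem.Int.floordiv mx 2) c k hc1 hcn]
          intro m hm
          refine ⟨?_, by omega, by omega, hM m hm⟩
          rw [PySem.Int.floordiv_eq_ediv_of_pos (by norm_num)]
          omega
        exact ⟨by omega, by omega, by omega⟩
      · rw [PySem.Int.floordiv_eq_ediv_of_pos (by norm_num)]
        simp only [Prod.mk.injEq]
        constructor <;> (push_cast; try omega)

-- ---- order facts about the two hit lists ----
def pvLexLt (a b : Int × Int) : Prop := a.1 < b.1 ∨ (a.1 = b.1 ∧ a.2 < b.2)

lemma pvABlock_map (seq : List Char) (mn mx i : Int) (h0 : 0 ≤ i) (hmn : 1 ≤ mn) :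
    pvABlock seq mn mx i
      = ((PySem.List.pyRange mn (mx + 1) 1).filter
          (fun j => !(decide (i + j > (seq.length : Int)))
            && is_palindrom (PySem.List.slice seq (some i) (some (i + j))))).map
        (fun j => (i + 1, j)) := by
  unfold pvABlock
  apply List.map_congr_left
  intro j hj
  rw [List.mem_filter] at hj
  obtain ⟨hjr, hjc⟩ := hj
  rw [PySem.List.mem_pyRange_one] at hjr
  simp only [Bool.and_eq_true, Bool.not_eq_true', decide_eq_false_iff_not, not_lt] at hjc
  rw [pvSliceLen seq i j h0 (by omega) hjc.1]

lemma pvAList_pairwise (seq : List Char) (mn mx : Int) (hmn : 1 ≤ mn) :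
    (pvAList seq mn mx).Pairwise pvLexLt := by
  unfold pvAList
  rw [List.pairwise_flatMap]
  constructor
  · intro i hi
    rw [PySem.List.mem_pyRange_one] at hi
    rw [pvABlock_map seq mn mx i hi.1 hmn]
    apply List.Pairwise.map (R := (· < ·))
    · intro a b hab
      exact Or.inr ⟨rfl, hab⟩
    · exact (PySem.List.pairwise_lt_pyRange_one mn (mx + 1)).filter _
  · apply (PySem.List.pairwise_lt_pyRange_one 0 (seq.length : Int)).imp
    intro i i' hii x hx y hy
    unfold pvABlock at hx hy
    rw [List.mem_map] at hx hy
    obtain ⟨jx, _, rfl⟩ := hx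
    obtain ⟨jy, _, rfl⟩ := hy
    exact Or.inl (by simpa using hii)

lemma pvLexLt_ne {a b : Int × Int} (h : pvLexLt a b) : a ≠ b := by
  rintro rfl
  unfold pvLexLt at h
  omega

lemma pvAList_nodup (seq : List Char) (mn mx : Int) (hmn : 1 ≤ mn) :
    (pvAList seq mn mx).Nodup :=
  (pvAList_pairwise seq mn mx hmn).imp pvLexLt_ne

lemma pvBFlat_nodup (seq : List Char) (mn mx : Int) : (pvBFlat seq mn mx).Nodup := by
  unfold pvBFlat
  rw [List.Nodup, List.pairwise_flatMap]
  constructor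
  · intro c _
    unfold pvBBlock
    apply List.Pairwise.map (R := (· < ·))
    · intro a b hab
      simp only [ne_eq, Prod.mk.injEq, not_and]
      intro _ h2
      omega
    · rw [PySem.List.pyRange_of_pos _ _ (by norm_num : (0:Int) < 2)]
      apply List.Pairwise.map (R := (· < ·))
      · intro a b hab; omega
      · exact List.pairwise_lt_range
  · apply (PySem.List.pairwise_lt_pyRange_one 1 (seq.length : Int)).imp
    intro c c' hcc x hx y hy
    unfold pvBBlock at hx hy
    rw [List.mem_map] at hx hy
    obtain ⟨Lx, _, rfl⟩ := hx
    obtain ⟨Ly, _, rfl⟩ := hy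
    simp only [ne_eq, Prod.mk.injEq, not_and]
    intro h1 h2
    rw [h2] at h1
    omega

-- ---- sorted(list of pairs): any strictly lex-increasing rearrangement is THE result ----
def pvBefore (a b : Int × Int) : Bool :=
  decide (a.1 < b.1) || (!decide (b.1 < a.1) && decide (a.2 < b.2))

def pvLexLe (a b : Int × Int) : Prop := ¬ pvLexLt b a

lemma pvSorted2_eq_foldl (xs : List (Int × Int)) :
    PySem.List.sorted2 xs Prod.fst Prod.snd
      = xs.foldl (fun acc x => PySem.List.insertBy pvBefore x acc) [] := rfl

lemma pvBefore_iff (a b : Int × Int) : pvBefore a b = true ↔ pvLexLt a b := by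
  unfold pvBefore pvLexLt
  simp only [Bool.or_eq_true, Bool.and_eq_true, Bool.not_eq_true', decide_eq_true_eq,
    decide_eq_false_iff_not, not_lt]
  omega

lemma pvLexLe_antisymm {a b : Int × Int} (h1 : pvLexLe a b) (h2 : pvLexLe b a) : a = b := by
  unfold pvLexLe pvLexLt at h1 h2
  have : a.1 = b.1 ∧ a.2 = b.2 := by omega
  exact Prod.ext this.1 this.2

lemma pvLexLt_le {a b : Int × Int} (h : pvLexLt a b) : pvLexLe a b := by
  unfold pvLexLe pvLexLt at *
  omega

lemma pvInsertBy_nil (x : Int × Int) : PySem.List.insertBy pvBefore x [] = [x] := rfl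
lemma pvInsertBy_cons (x y : Int × Int) (ys : List (Int × Int)) :
    PySem.List.insertBy pvBefore x (y :: ys)
      = if pvBefore x y = true then x :: y :: ys else y :: PySem.List.insertBy pvBefore x ys := rfl

lemma pvInsertBy_pairwise (x : Int × Int) (ys : List (Int × Int))
    (h : ys.Pairwise pvLexLe) : (PySem.List.insertBy pvBefore x ys).Pairwise pvLexLe := by
  induction ys with
  | nil => rw [pvInsertBy_nil]; simp
  | cons y ys ih =>
    rw [pvInsertBy_cons]
    rw [List.pairwise_cons] at h
    by_cases hb : pvBefore x y = true
    · rw [if_pos hb]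
      have hxy : pvLexLt x y := (pvBefore_iff _ _).mp hb
      rw [List.pairwise_cons]
      refine ⟨?_, List.pairwise_cons.mpr h⟩
      intro z hz
      rcases List.mem_cons.mp hz with rfl | hz'
      · exact pvLexLt_le hxy
      · have hyz := h.1 z hz'
        unfold pvLexLe pvLexLt at *
        omega
    · rw [if_neg hb]
      rw [List.pairwise_cons]
      refine ⟨?_, ih h.2⟩
      intro z hz
      rcases (PySem.List.mem_insertBy pvBefore x z ys).mp hz with rfl | hz'
      · exact fun hlt => hb ((pvBefore_iff _ _).mpr hlt)
      · exact h.1 z hz'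

lemma pvFoldl_insert_pairwise (l : List (Int × Int)) (acc : List (Int × Int))
    (h : acc.Pairwise pvLexLe) :
    (l.foldl (fun acc x => PySem.List.insertBy pvBefore x acc) acc).Pairwise pvLexLe := by
  induction l generalizing acc with
  | nil => exact h
  | cons x l ih => exact ih _ (pvInsertBy_pairwise x acc h)

lemma pvSorted2_eq (xs ys : List (Int × Int)) (hperm : ys.Perm xs)
    (hp : ys.Pairwise pvLexLt) :
    PySem.List.sorted2 xs Prod.fst Prod.snd = ys := by
  apply List.Perm.eq_of_pairwise (le := pvLexLe)
  · exact fun a b _ _ h1 h2 => pvLexLe_antisymm h1 h2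
  · rw [pvSorted2_eq_foldl]
    exact pvFoldl_insert_pairwise xs [] (by simp)
  · exact hp.imp pvLexLt_le
  · exact (PySem.List.sorted2_perm xs Prod.fst Prod.snd false).trans hperm.symm

-- ---- case analysis and assembly ----
lemma pvRange2_nil (a b : Int) (h : b ≤ a) : PySem.List.pyRange a b 2 = [] := by
  rw [PySem.List.pyRange_of_pos _ _ (by norm_num : (0:Int) < 2), if_neg (not_lt.mpr h)]
  simp

lemma pvRho_bound (seq : List Char) (cap c : Int) (hc1 : 1 ≤ c) (hcn : c < (seq.length : Int)) :
    2 * pvRho seq cap c ≤ (seq.length : Int) := by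
  have hs := pvRho_spec seq cap c hc1 hcn
  by_cases h0 : pvRho seq cap c ≤ 0
  · omega
  · have := pvCondB_bounds (hs.2.1 (pvRho seq cap c - 1) (by omega) (by omega))
    omega

lemma pvShort (sequence : String) (mn mx : Int) (h : (sequence.toList.length : Int) < mn) :
    get_palindrom_locations sequence mn mx = get_palindrom_locations_alt sequence mn mx := by
  have hA : pvAList sequence.toList mn mx = [] := by
    unfold pvAList pvABlock
    rw [List.flatMap_eq_nil_iff]
    intro i hi
    rw [PySem.List.mem_pyRange_one] at hi
    have : (PySem.List.pyRange mn (mx + 1) 1).filter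
        (fun j => !(decide (i + j > (sequence.toList.length : Int)))
          && is_palindrom (PySem.List.slice sequence.toList (some i) (some (i + j)))) = [] := by
      rw [List.filter_eq_nil_iff]
      intro j hj
      rw [PySem.List.mem_pyRange_one] at hj
      simp only [Bool.and_eq_true, Bool.not_eq_true', decide_eq_false_iff_not, not_lt, not_and]
      intro hle
      omega
    rw [this]
    simp
  have hB : pvBFlat sequence.toList mn mx = [] := by
    unfold pvBFlat pvBBlock
    rw [List.flatMap_eq_nil_iff]
    intro c hc
    rw [PySem.List.mem_pyRange_one] at hc
    have hrb := pvRho_bound sequence.toList (PySem.Int.floordiv mx 2) c hc.1 hc.2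
    have hs := (pvRho_spec sequence.toList (PySem.Int.floordiv mx 2) c hc.1 hc.2).1
    have hlo := pvLo_facts mn
    rw [pvRange2_nil _ _ (by omega)]
    simp
  by_cases hwin : mx < pvLo mn
  · rw [pvA_eq, pvB_eq_nil sequence mn mx hwin, hA]
  · rw [pvA_eq, pvB_eq sequence mn mx hwin, hA, hB]
    rfl

lemma pvMain (sequence : String) (mn mx : Int)
    (hPre : sequence.toList.all (fun ch => decide (ch ∈ (['A', 'C', 'G', 'T'] : List Char))) = true)
    (hmn : 1 ≤ mn) :
    get_palindrom_locations sequence mn mx = get_palindrom_locations_alt sequence mn mx := by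
  have hP := pvPre_chars hPre
  by_cases hwin : mx < pvLo mn
  · rw [pvA_eq, pvB_eq_nil sequence mn mx hwin]
    rw [List.eq_nil_iff_forall_not_mem]
    intro a ha
    obtain ⟨c, k, hk1, -, -, hmn2, hmx2, -, -⟩ := (pvA_mem _ mn mx hP hmn a).mp ha
    have hlo := pvLo_facts mn
    omega
  · rw [pvA_eq, pvB_eq sequence mn mx hwin]
    refine (pvSorted2_eq _ _ ?_ (pvAList_pairwise _ mn mx hmn)).symm
    rw [List.perm_ext_iff_of_nodup (pvAList_nodup _ mn mx hmn) (pvBFlat_nodup _ mn mx)]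
    intro a
    rw [pvA_mem _ mn mx hP hmn a, pvB_mem _ mn mx hP a]

lemma pvA_nil (sequence : String) (mn mx : Int) (h : sequence.toList = []) :
    get_palindrom_locations sequence mn mx = [] := by
  rw [pvA_eq]
  unfold pvAList
  rw [h, show ((([] : List Char).length : Int)) = 0 from rfl,
      PySem.List.pyRange_one_eq_nil (by norm_num)]
  rfl

lemma pvEmpty (sequence : String) (mn mx : Int) (h : sequence.toList = []) :
    get_palindrom_locations sequence mn mx = get_palindrom_locations_alt sequence mn mx := by
  by_cases hwin : mx < pvLo mn
  · rw [pvA_nil sequence mn mx h, pvB_eq_nil sequence mn mx hwin]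
  · rw [pvA_nil sequence mn mx h, pvB_eq sequence mn mx hwin]
    unfold pvBFlat
    rw [h, show ((([] : List Char).length : Int)) = 0 from rfl,
        PySem.List.pyRange_one_eq_nil (by norm_num)]
    rfl

lemma pvGT (sequence : String) (mn mx : Int) (h : mx < mn) :
    get_palindrom_locations sequence mn mx = get_palindrom_locations_alt sequence mn mx := by
  have hlo := pvLo_facts mn
  rw [pvA_eq, pvB_eq_nil sequence mn mx (by omega)]
  unfold pvAList pvABlock
  rw [PySem.List.pyRange_one_eq_nil (by omega : mx + 1 ≤ mn)]
  simp

lemma pvZeroMem (sequence : String) (mn mx : Int) (hmn0 : mn ≤ 0) (hmnmx : mn ≤ mx)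
    (hn : 1 ≤ sequence.toList.length) :
    ∃ x : Int × Int, x ∈ get_palindrom_locations sequence mn mx ∧ x.2 = 0 := by
  rw [pvA_eq]
  set seq := sequence.toList with hseq
  set n : Int := (seq.length : Int) with hn'
  set i0 : Int := if -mn ≤ n - 1 then -mn else 0 with hi0
  have hi0n : 0 ≤ i0 ∧ i0 < n ∧ i0 + mn ≤ n := by
    rw [hi0]; split_ifs <;> omega
  have hslice : PySem.List.slice seq (some i0) (some (i0 + mn)) = [] := by
    apply List.eq_nil_of_length_eq_zero
    rw [PySem.List.length_slice]
    simp only [PySem.List.clampIdx]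
    rw [hi0]
    split_ifs <;> omega
  refine ⟨(i0 + 1, 0), ?_, rfl⟩
  unfold pvAList pvABlock
  rw [List.mem_flatMap]
  refine ⟨i0, by rw [PySem.List.mem_pyRange_one]; exact ⟨hi0n.1, hi0n.2.1⟩, ?_⟩
  rw [List.mem_map]
  refine ⟨mn, ?_, ?_⟩
  · rw [List.mem_filter, PySem.List.mem_pyRange_one]
    refine ⟨⟨le_refl mn, by omega⟩, ?_⟩
    simp only [Bool.and_eq_true, Bool.not_eq_true', decide_eq_false_iff_not, not_lt]
    exact ⟨hi0n.2.2, by rw [hslice]; decide⟩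
  · rw [hslice]
    rfl

lemma pvAltPos (sequence : String) (mn mx : Int) :
    ∀ y ∈ get_palindrom_locations_alt sequence mn mx, (2 : Int) ≤ y.2 := by
  intro y hy
  by_cases hwin : mx < pvLo mn
  · rw [pvB_eq_nil sequence mn mx hwin] at hy
    exact absurd hy (List.not_mem_nil)
  rw [pvB_eq sequence mn mx hwin] at hy
  have hy' := (PySem.List.sorted2_perm _ _ _ _).mem_iff.mp hy
  unfold pvBFlat pvBBlock at hy'
  rw [List.mem_flatMap] at hy'
  obtain ⟨c, _, hy2⟩ := hy'
  rw [List.mem_map] at hy2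
  obtain ⟨L, hL, rfl⟩ := hy2
  rw [PySem.List.mem_pyRange_iff_of_pos (by norm_num)] at hL
  have hlo := pvLo_facts mn
  simp only []
  omega

-- ===== VERDICT (by name: the statement is the Claim_ definition above) =====
theorem get_palindrom_locations_spec : Claim_unchanged_get_palindrom_locations := by
  intro sequence min_len max_len _ hpre hD
  rcases hpre with hacgt | hgt | hshort
  · by_cases hseq : sequence.toList = []
    · exact pvEmpty sequence min_len max_len hseq
    · by_cases hmn : 1 ≤ min_len
      · exact pvMain sequence min_len max_len hacgt hmn
      · have hne : sequence ≠ "" := fun h => hseq (h ▸ rfl)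
        have hmx : max_len < min_len := by
          by_contra hmx
          exact hD ⟨by omega, by omega, hne⟩
        exact pvGT sequence min_len max_len hmx
  · exact pvGT sequence min_len max_len hgt
  · exact pvShort sequence min_len max_len hshort


theorem get_palindrom_locations_changed : Claim_changed_get_palindrom_locations := by
  unfold Claim_changed_get_palindrom_locations
  refine ⟨by decide, by decide, by decide, by decide, by decide, by decide⟩

theorem get_palindrom_locations_tight : Claim_exact_get_palindrom_locations := by
  intro sequence min_len max_len _ _ hD heq
  obtain ⟨hmn0, hmnmx, hne⟩ := hD
  have hn : 1 ≤ sequence.toList.length := by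
    rcases Nat.eq_zero_or_pos sequence.toList.length with h | h
    · exact absurd (by rw [← String.ofList_toList (s := sequence), List.length_eq_zero_iff.mp h]) hne
    · exact h
  obtain ⟨x, hx, hx2⟩ := pvZeroMem sequence min_len max_len hmn0 hmnmx hn
  rw [heq] at hx
  have := pvAltPos sequence min_len max_len x hx
  omega
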